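-- pv_equiv track=rewrite | github.com/DiaconuAndr3i/SPERProject | BUG0.py | constructObstacles
-- ===== SOURCE A (Python) =====
-- def constructObstacles(limit_obstacle_x, limit_obstacle_y):
--     obstacle_x = []
--     obstacle_y = []
--     for limit_x, limit_y in zip(limit_obstacle_x, limit_obstacle_y):
--
--         for ob_x in range(limit_x[0], limit_x[1]):
--             for ob_y in range(limit_y[0], limit_y[1]):
--                 obstacle_x.append(ob_x)
--                 obstacle_y.append(ob_y)
--
--     return obstacle_x, obstacle_y
-- ===== SOURCE B (Python) =====
-- def constructObstacles(limit_obstacle_x, limit_obstacle_y):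
--     obstacle_x = []
--     obstacle_y = []
--     for (x0, x1), (y0, y1) in zip(limit_obstacle_x, limit_obstacle_y):
--         h = y1 - y0
--         if x0 < x1 and 0 < h:
--             n = (x1 - x0) * h
--             obstacle_x += [x0 + k // h for k in range(n)]
--             obstacle_y += [y0 + k % h for k in range(n)]
--     return obstacle_x, obstacle_y
-- ===== Notes on version B (the rewrite author's own statement) =====
-- stated objective: alternative
-- what changed: The nested x/y loops are replaced by flat-index arithmetic: per rectangle B enumerates one flat index k over the w*h cells and recovers the coordinates as x0 + k // h and y0 + k % h, building each coordinate list in its own comprehension.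
import Mathlib
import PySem

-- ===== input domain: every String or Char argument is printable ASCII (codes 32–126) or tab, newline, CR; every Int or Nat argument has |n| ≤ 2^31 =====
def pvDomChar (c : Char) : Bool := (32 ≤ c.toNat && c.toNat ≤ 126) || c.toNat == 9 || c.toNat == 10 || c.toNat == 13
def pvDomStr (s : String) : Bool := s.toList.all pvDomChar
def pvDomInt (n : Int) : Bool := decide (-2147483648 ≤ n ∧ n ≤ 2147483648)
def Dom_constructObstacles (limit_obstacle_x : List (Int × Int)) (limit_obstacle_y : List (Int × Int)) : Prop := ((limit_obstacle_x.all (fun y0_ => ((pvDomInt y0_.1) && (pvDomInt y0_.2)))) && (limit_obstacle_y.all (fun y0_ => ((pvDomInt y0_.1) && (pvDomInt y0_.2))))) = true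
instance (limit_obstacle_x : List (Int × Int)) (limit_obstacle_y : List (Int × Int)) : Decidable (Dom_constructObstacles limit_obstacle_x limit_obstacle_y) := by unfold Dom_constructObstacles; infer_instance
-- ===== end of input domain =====

-- B replaces A's nested x/y loops by flat-index arithmetic per rectangle (cell k ↦ (x0 + k // h, y0 + k % h)); objective: alternative.

-- ===== PORT A =====
-- Port of A: nested loops over both ranges, appending one coordinate pair at a time.
def constructObstacles (limit_obstacle_x : List (Int × Int)) (limit_obstacle_y : List (Int × Int)) : List Int × List Int :=
  (List.zip limit_obstacle_x limit_obstacle_y).foldl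
    (fun acc p =>
      (PySem.List.pyRange p.1.1 p.1.2 1).foldl
        (fun acc2 ob_x =>
          (PySem.List.pyRange p.2.1 p.2.2 1).foldl
            (fun acc3 ob_y => (acc3.1 ++ [ob_x], acc3.2 ++ [ob_y])) acc2)
        acc)
    ([], [])

-- ===== PORT B =====
-- Port of B: per rectangle, one flat index k over the n = (x1-x0)*(y1-y0) cells;
-- the coordinates are recovered arithmetically as (x0 + k // h, y0 + k % h).
def constructObstacles_alt (limit_obstacle_x : List (Int × Int)) (limit_obstacle_y : List (Int × Int)) : List Int × List Int :=
  (List.zip limit_obstacle_x limit_obstacle_y).foldl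
    (fun acc p =>
      let h := p.2.2 - p.2.1
      if p.1.1 < p.1.2 ∧ 0 < h then
        let n := (p.1.2 - p.1.1) * h
        (acc.1 ++ (PySem.List.pyRange 0 n 1).map (fun k => p.1.1 + PySem.Int.floordiv k h),
         acc.2 ++ (PySem.List.pyRange 0 n 1).map (fun k => p.2.1 + PySem.Int.mod k h))
      else acc)
    ([], [])

-- ===== PRECONDITION & SPEC =====
def Spec_constructObstacles (limit_obstacle_x : List (Int × Int)) (limit_obstacle_y : List (Int × Int)) (out : List Int × List Int) : Prop := out = constructObstacles_alt limit_obstacle_x limit_obstacle_y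
instance (limit_obstacle_x : List (Int × Int)) (limit_obstacle_y : List (Int × Int)) (out : List Int × List Int) : Decidable (Spec_constructObstacles limit_obstacle_x limit_obstacle_y out) := by unfold Spec_constructObstacles; infer_instance

-- ===== CLAIM (what is proved, stated in full; the proofs are below) =====
def Claim_equal_constructObstacles : Prop := ∀ (limit_obstacle_x : List (Int × Int)) (limit_obstacle_y : List (Int × Int)), Dom_constructObstacles limit_obstacle_x limit_obstacle_y → Spec_constructObstacles limit_obstacle_x limit_obstacle_y (constructObstacles limit_obstacle_x limit_obstacle_y)

-- ===== LEMMAS AND PROOFS =====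

-- A's inner y-loop on one x equals a block extension.
lemma pvInner (x : Int) (ys : List Int) (acc : List Int × List Int) :
    ys.foldl (fun a y => (a.1 ++ [x], a.2 ++ [y])) acc
      = (acc.1 ++ List.replicate ys.length x, acc.2 ++ ys) := by
  induction ys generalizing acc with
  | nil => simp
  | cons y t ih => simp [List.foldl, ih, List.replicate_succ]

-- a foldl whose step never changes the accumulator
lemma pvFoldlId {α β : Type} (l : List α) (acc : β) : l.foldl (fun a _ => a) acc = acc := by
  induction l with
  | nil => rfl
  | cons _ t ih => simp [List.foldl, ih]

-- the block-extension loop over xs equals two flatMaps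
lemma pvBlocks (xs ys : List Int) (acc : List Int × List Int) :
    xs.foldl (fun a x => (a.1 ++ List.replicate ys.length x, a.2 ++ ys)) acc
      = (acc.1 ++ xs.flatMap (fun x => List.replicate ys.length x),
         acc.2 ++ xs.flatMap (fun _ => ys)) := by
  induction xs generalizing acc with
  | nil => simp
  | cons x t ih => simp [List.foldl, ih]

-- x-coordinates: row-major flatMap of replicates equals the flat-index division form
lemma pvNatX (w h : Nat) (x0 : Int) (hh : 0 < h) :
    ((List.range w).map (fun i : Nat => x0 + (i : Int))).flatMap (fun x => List.replicate h x)
      = (List.range (w * h)).map (fun k : Nat => x0 + ((k / h : Nat) : Int)) := by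
  induction w with
  | zero => simp
  | succ w ih =>
      rw [List.range_succ, Nat.succ_mul, List.range_add]
      simp only [List.map_append, List.flatMap_append, ih, List.map_map]
      congr 1
      simp only [List.flatMap_cons, List.flatMap_nil, List.append_nil, List.map_cons, List.map_nil]
      apply (List.eq_replicate_iff.mpr ⟨by simp, ?_⟩).symm
      intro b hb
      simp only [List.mem_map, List.mem_range, Function.comp] at hb
      obtain ⟨j, hj, rfl⟩ := hb
      have hdiv : (w * h + j) / h = w := by
        rw [Nat.mul_comm w h, Nat.mul_add_div hh]
        simp [Nat.div_eq_of_lt hj]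
      rw [hdiv]

-- y-coordinates: the y-range repeated per row equals the flat-index modulo form
lemma pvNatY (w h : Nat) (x0 y0 : Int) (_hh : 0 < h) :
    ((List.range w).map (fun i : Nat => x0 + (i : Int))).flatMap
        (fun _ => (List.range h).map (fun j : Nat => y0 + (j : Int)))
      = (List.range (w * h)).map (fun k : Nat => y0 + ((k % h : Nat) : Int)) := by
  induction w with
  | zero => simp
  | succ w ih =>
      rw [List.range_succ, Nat.succ_mul, List.range_add]
      simp only [List.map_append, List.flatMap_append, ih, List.map_map]
      congr 1
      show List.flatMap (fun _ => (List.range h).map (fun j : Nat => y0 + (j : Int))) [x0 + (w : Int)] = _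
      simp only [List.flatMap_cons, List.flatMap_nil, List.append_nil]
      apply (List.map_congr_left ?_).symm
      intro j hj
      simp only [List.mem_range] at hj
      have h2 : (w * h + j) % h = j := by
        rw [Nat.mul_comm w h, Nat.mul_add_mod]
        exact Nat.mod_eq_of_lt hj
      simp [Function.comp, h2]

-- the two per-rectangle step functions agree
lemma pvStep :
    (fun (acc : List Int × List Int) (p : (Int × Int) × (Int × Int)) =>
      (PySem.List.pyRange p.1.1 p.1.2 1).foldl
        (fun acc2 ob_x =>
          (PySem.List.pyRange p.2.1 p.2.2 1).foldl
            (fun acc3 ob_y => (acc3.1 ++ [ob_x], acc3.2 ++ [ob_y])) acc2)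
        acc)
    = (fun (acc : List Int × List Int) (p : (Int × Int) × (Int × Int)) =>
      let h := p.2.2 - p.2.1
      if p.1.1 < p.1.2 ∧ 0 < h then
        let n := (p.1.2 - p.1.1) * h
        (acc.1 ++ (PySem.List.pyRange 0 n 1).map (fun k => p.1.1 + PySem.Int.floordiv k h),
         acc.2 ++ (PySem.List.pyRange 0 n 1).map (fun k => p.2.1 + PySem.Int.mod k h))
      else acc) := by
  funext acc p
  obtain ⟨⟨x0, x1⟩, ⟨y0, y1⟩⟩ := p
  simp only
  by_cases hx : x0 < x1
  case neg =>
    have hg : ¬ (x0 < x1 ∧ 0 < y1 - y0) := by tauto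
    rw [if_neg hg, PySem.List.pyRange_one_eq_nil (a := x0) (b := x1) (by omega)]
    rfl
  by_cases hy : 0 < y1 - y0
  case neg =>
    have hg : ¬ (x0 < x1 ∧ 0 < y1 - y0) := by tauto
    rw [if_neg hg, PySem.List.pyRange_one_eq_nil (a := y0) (b := y1) (by omega)]
    simp only [List.foldl_nil]
    exact pvFoldlId _ acc
  -- main case: both ranges non-empty
  rw [if_pos ⟨hx, hy⟩]
  have hinner :
      (fun (acc2 : List Int × List Int) (ob_x : Int) =>
        (PySem.List.pyRange y0 y1 1).foldl
          (fun acc3 ob_y => (acc3.1 ++ [ob_x], acc3.2 ++ [ob_y])) acc2)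
      = (fun (acc2 : List Int × List Int) (ob_x : Int) =>
        (acc2.1 ++ List.replicate (PySem.List.pyRange y0 y1 1).length ob_x,
         acc2.2 ++ PySem.List.pyRange y0 y1 1)) := by
    funext acc2 ob_x; exact pvInner ob_x _ acc2
  rw [hinner, pvBlocks]
  have hcast : (((y1 - y0).toNat : Int)) = y1 - y0 := by omega
  have hn : ((x1 - x0) * (y1 - y0)).toNat = (x1 - x0).toNat * (y1 - y0).toNat :=
    Int.toNat_mul (by omega) (by omega)
  rw [PySem.List.pyRange_one x0 x1, PySem.List.pyRange_one y0 y1,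
      PySem.List.pyRange_one 0 ((x1 - x0) * (y1 - y0))]
  simp only [Int.sub_zero, hn, List.map_map, List.length_map, List.length_range]
  simp only [Prod.mk.injEq]
  refine ⟨?_, ?_⟩
  · congr 1
    rw [pvNatX (x1 - x0).toNat (y1 - y0).toNat x0 (by omega)]
    apply List.map_congr_left
    intro k _
    simp only [Function.comp_apply, zero_add]
    rw [← hcast, PySem.Int.floordiv_natCast]
    simp
  · congr 1
    rw [pvNatY (x1 - x0).toNat (y1 - y0).toNat x0 y0 (by omega)]
    apply List.map_congr_left
    intro k _
    simp only [Function.comp_apply, zero_add]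
    rw [← hcast, PySem.Int.mod_natCast]
    simp

-- ===== VERDICT (by name: the statement is the Claim_ definition above) =====
theorem constructObstacles_spec : Claim_equal_constructObstacles := by
  intro lx ly _
  unfold Spec_constructObstacles constructObstacles constructObstacles_alt
  rw [pvStep]
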